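-- pv_equiv track=rewrite | github.com/vibrooooo/testdownlaod- | app.py | calculate_hearts_desire_number
-- ===== SOURCE A (Python) =====
-- def calculate_hearts_desire_number(full_name):
--     vowel_values = {
--         'A': 1, 'E': 5, 'I': 9, 'O': 6, 'U': 3, 'Y': 7
--     }
--     total = sum(vowel_values.get(char, 0) for char in full_name.upper() if char in vowel_values)
--     while total > 9:
--         total = sum(map(int, str(total)))
--     return total
-- ===== SOURCE B (Python) =====
-- def calculate_hearts_desire_number(full_name):
--     vowel_values = {
--         'A': 1, 'E': 5, 'I': 9, 'O': 6, 'U': 3, 'Y': 7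
--     }
--     total = sum(vowel_values.get(char, 0) for char in full_name.upper() if char in vowel_values)
--     # closed-form digital root instead of the iterated digit-sum loop
--     return 0 if total == 0 else (total - 1) % 9 + 1
-- ===== Notes on version B (the rewrite author's own statement) =====
-- stated objective: simpler
-- what changed: The while-loop that repeatedly sums the decimal digits (via str/int round-trips) is replaced by the closed-form digital root 0 if total == 0 else (total - 1) % 9 + 1; the vowel-summing stage is unchanged.
import Mathlib
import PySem

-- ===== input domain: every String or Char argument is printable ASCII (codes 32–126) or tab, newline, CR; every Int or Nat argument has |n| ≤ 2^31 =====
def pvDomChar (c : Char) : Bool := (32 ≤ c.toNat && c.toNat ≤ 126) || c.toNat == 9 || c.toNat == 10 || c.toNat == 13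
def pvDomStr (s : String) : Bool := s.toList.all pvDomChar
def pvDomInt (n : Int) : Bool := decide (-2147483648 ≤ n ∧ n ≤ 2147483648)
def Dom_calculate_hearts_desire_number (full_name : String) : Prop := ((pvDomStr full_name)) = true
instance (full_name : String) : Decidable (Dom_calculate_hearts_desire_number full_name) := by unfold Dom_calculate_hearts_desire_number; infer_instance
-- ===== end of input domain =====

-- B replaces A's while-loop digit-sum reduction by the closed-form digital root; return values proved equal on Dom.

-- ===== PORT A =====
-- vowel_values = {'A': 1, 'E': 5, 'I': 9, 'O': 6, 'U': 3, 'Y': 7}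
def pvVowelsA : PySem.Dict Char Int :=
  PySem.Dict.ofList [('A', 1), ('E', 5), ('I', 9), ('O', 6), ('U', 3), ('Y', 7)]

-- int(c) for one character c of str(total); the getD 0 default is unreachable
-- (str of a nonnegative int consists of digits only)
def pvCharInt (c : Char) : Int := (PySem.Int.ofChars? [c]).getD 0

-- sum(map(int, str(total)))
def pvDigitSum (t : Int) : Int := ((PySem.Int.toStr t).toList.map pvCharInt).sum

-- while total > 9: total = sum(map(int, str(total)))   (fuel only makes it total;
-- fuel total.toNat suffices since the digit sum strictly decreases above 9)
def pvReduceA : Nat → Int → Int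
  | 0, t => t
  | f + 1, t => if 9 < t then pvReduceA f (pvDigitSum t) else t

def calculate_hearts_desire_number (full_name : String) : Int :=
  let total : Int :=
    (((PySem.Str.upper full_name).toList.filter (fun c => pvVowelsA.contains c)).map
      (fun c => pvVowelsA.getD c 0)).sum
  pvReduceA total.toNat total

-- ===== PORT B =====
def pvVowelsB : PySem.Dict Char Int :=
  PySem.Dict.ofList [('A', 1), ('E', 5), ('I', 9), ('O', 6), ('U', 3), ('Y', 7)]

def calculate_hearts_desire_number_alt (full_name : String) : Int :=
  let total : Int :=
    (((PySem.Str.upper full_name).toList.filter (fun c => pvVowelsB.contains c)).map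
      (fun c => pvVowelsB.getD c 0)).sum
  if total = 0 then 0 else PySem.Int.mod (total - 1) 9 + 1

-- ===== PRECONDITION & SPEC =====
def Spec_calculate_hearts_desire_number (full_name : String) (out : Int) : Prop := out = calculate_hearts_desire_number_alt full_name
instance (full_name : String) (out : Int) : Decidable (Spec_calculate_hearts_desire_number full_name out) := by unfold Spec_calculate_hearts_desire_number; infer_instance

-- ===== CLAIM (what is proved, stated in full; the proofs are below) =====
def Claim_equal_calculate_hearts_desire_number : Prop := ∀ (full_name : String), Dom_calculate_hearts_desire_number full_name → Spec_calculate_hearts_desire_number full_name (calculate_hearts_desire_number full_name)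

-- ===== LEMMAS AND PROOFS =====

theorem pvCharInt_digitChar (d : Nat) (hd : d < 10) :
    pvCharInt (Nat.digitChar d) = (d : Int) := by
  interval_cases d <;> decide

theorem pvToDigitsCore_sum (f : Nat) : ∀ (n : Nat) (acc : List Char), n < f →
    ((Nat.toDigitsCore 10 f n acc).map pvCharInt).sum
      = ((Nat.digits 10 n).sum : Int) + (acc.map pvCharInt).sum := by
  induction f with
  | zero => intro n acc h; omega
  | succ f ih =>
    intro n acc h
    rw [Nat.toDigitsCore.eq_def]
    simp only []
    by_cases h0 : n / 10 = 0
    · simp only [h0]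
      rcases Nat.eq_zero_or_pos n with hn | hn
      · subst hn; simp [pvCharInt_digitChar 0 (by omega)]
      · rw [Nat.digits_def' (by omega : 1 < 10) hn, h0]
        simp [pvCharInt_digitChar (n % 10) (by omega)]
    · rw [if_neg h0]
      rw [ih (n / 10) _ (by omega)]
      rw [Nat.digits_def' (by omega : 1 < 10) (by omega : 0 < n)]
      simp [pvCharInt_digitChar (n % 10) (by omega)]
      ring

theorem pvDigitSum_eq (t : Int) (ht : 0 ≤ t) :
    pvDigitSum t = ((Nat.digits 10 t.toNat).sum : Int) := by
  unfold pvDigitSum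
  rw [PySem.Int.toList_toStr]
  unfold PySem.Int.toChars
  rw [if_neg (by omega)]
  unfold Nat.toDigits
  rw [pvToDigitsCore_sum (t.toNat + 1) t.toNat [] (by omega)]
  simp

theorem pvDigitsSum_le (n : Nat) : (Nat.digits 10 n).sum ≤ n := by
  induction n using Nat.strong_induction_on with
  | _ n ih =>
    rcases Nat.eq_zero_or_pos n with hn | hn
    · simp [hn]
    · rw [Nat.digits_def' (by omega : 1 < 10) hn]
      have := ih (n / 10) (by omega)
      simp only [List.sum_cons]
      omega

theorem pvDigitsSum_lt (n : Nat) (h : 10 ≤ n) : (Nat.digits 10 n).sum < n := by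
  rw [Nat.digits_def' (by omega : 1 < 10) (by omega : 0 < n)]
  have := pvDigitsSum_le (n / 10)
  simp only [List.sum_cons]
  omega

theorem pvDigitsSum_pos (n : Nat) (h : 1 ≤ n) : 0 < (Nat.digits 10 n).sum := by
  induction n using Nat.strong_induction_on with
  | _ n ih =>
    rw [Nat.digits_def' (by omega : 1 < 10) (by omega : 0 < n)]
    by_cases h10 : n < 10
    · simp only [List.sum_cons]; omega
    · have := ih (n / 10) (by omega) (by omega)
      simp only [List.sum_cons]; omega

theorem pvFmod_nine (a : Int) : PySem.Int.mod a 9 = a % 9 := by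
  unfold PySem.Int.mod
  rw [Int.fmod_eq_emod, if_pos (Or.inl (by norm_num))]
  ring

theorem pvReduce_eq (f : Nat) : ∀ (t : Int), 0 ≤ t → t.toNat ≤ f →
    pvReduceA f t = if t = 0 then 0 else PySem.Int.mod (t - 1) 9 + 1 := by
  induction f with
  | zero =>
    intro t ht hf
    have : t = 0 := by omega
    simp [this, pvReduceA]
  | succ f ih =>
    intro t ht hf
    show (if 9 < t then pvReduceA f (pvDigitSum t) else t) = _
    by_cases h9 : 9 < t
    · rw [if_pos h9]
      have heq : pvDigitSum t = ((Nat.digits 10 t.toNat).sum : Int) := pvDigitSum_eq t ht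
      have hlt : (Nat.digits 10 t.toNat).sum < t.toNat := pvDigitsSum_lt t.toNat (by omega)
      have hpos : 0 < (Nat.digits 10 t.toNat).sum := pvDigitsSum_pos t.toNat (by omega)
      have hmod : (Nat.digits 10 t.toNat).sum % 9 = t.toNat % 9 :=
        (Nat.modEq_nine_digits_sum t.toNat).symm
      rw [ih (pvDigitSum t) (by omega) (by omega)]
      rw [if_neg (by omega), if_neg (by omega)]
      rw [pvFmod_nine, pvFmod_nine, heq]
      have h1 : ((Nat.digits 10 t.toNat).sum : Int) % 9 = (t : Int) % 9 := by
        have ht' : ((t.toNat : Int)) = t := by omega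
        omega
      rw [Int.sub_emod, h1, ← Int.sub_emod]
    · rw [if_neg h9]
      by_cases h0 : t = 0
      · simp [h0]
      · rw [if_neg h0, pvFmod_nine, Int.emod_eq_of_lt (by omega) (by omega)]
        ring

theorem pvGetD_nonneg (c : Char) : 0 ≤ pvVowelsA.getD c 0 := by
  have hmk : pvVowelsA = PySem.Dict.mk [('A', 1), ('E', 5), ('I', 9), ('O', 6), ('U', 3), ('Y', 7)] := by rfl
  rw [hmk]
  simp only [PySem.Dict.getD, PySem.Dict.get?_mk_cons]
  split_ifs <;> simp [PySem.Dict.get?]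

theorem pvTotal_nonneg (l : List Char) :
    0 ≤ ((l.filter (fun c => pvVowelsA.contains c)).map (fun c => pvVowelsA.getD c 0)).sum := by
  apply List.sum_nonneg
  intro x hx
  obtain ⟨c, _, rfl⟩ := List.mem_map.mp hx
  exact pvGetD_nonneg c

-- ===== VERDICT (by name: the statement is the Claim_ definition above) =====
theorem calculate_hearts_desire_number_spec : Claim_equal_calculate_hearts_desire_number := by
  intro full_name _
  unfold Spec_calculate_hearts_desire_number
  unfold calculate_hearts_desire_number calculate_hearts_desire_number_alt
  have hd : pvVowelsB = pvVowelsA := rfl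
  rw [hd]
  set total : Int :=
    (((PySem.Str.upper full_name).toList.filter (fun c => pvVowelsA.contains c)).map
      (fun c => pvVowelsA.getD c 0)).sum with htot
  have h0 : 0 ≤ total := pvTotal_nonneg _
  exact pvReduce_eq total.toNat total h0 le_rfl
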